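-- pv_equiv track=rewrite | github.com/Jungle-Algorithm-Study/study | Week07/opjoobe/비밀지도.py | solution
-- ===== SOURCE A (Python) =====
-- def solution(n, arr1, arr2):
--     answer = []
--     for i in range(n):
--         n1, n2 = arr1[i], arr2[i]
--         new_n1, new_n2 = bin(n1)[2:], bin(n2)[2:]
--         len1 = len(new_n1)
--         len2 = len(new_n2)
--         if len1 < n:
--             new_n1 = '0'*(n-len1) + new_n1
--         if len2 < n:
--             new_n2 = '0'*(n-len2) + new_n2
--
--         now_line = ''
--         for j in range(n):
--             if new_n1[j] =='0' and new_n2[j] == '0':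
--                 now_line += ' '
--             else:
--                 now_line += '#'
--         answer.append(now_line)
--
--     return answer
-- ===== SOURCE B (Python) =====
-- def solution(n, arr1, arr2):
--     rows = []
--     for i in range(n):
--         marked = set()
--         for s in (bin(arr1[i])[2:].zfill(n), bin(arr2[i])[2:].zfill(n)):
--             marked |= {j for j, c in enumerate(s[:n]) if c != '0'}
--         rows.append(''.join('#' if j in marked else ' ' for j in range(n)))
--     return rows
-- ===== Notes on version B (the rewrite author's own statement) =====
-- stated objective: alternative
-- what changed: Per row B collects the set of marked column positions (union over the two rendered binary strings, padded with zfill) and then draws the row from that set, instead of A's character-by-character comparison of two manually zero-padded strings; Pre_ excludes only the inputs on which A raises IndexError (fewer than n entries in an array).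
import Mathlib
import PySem

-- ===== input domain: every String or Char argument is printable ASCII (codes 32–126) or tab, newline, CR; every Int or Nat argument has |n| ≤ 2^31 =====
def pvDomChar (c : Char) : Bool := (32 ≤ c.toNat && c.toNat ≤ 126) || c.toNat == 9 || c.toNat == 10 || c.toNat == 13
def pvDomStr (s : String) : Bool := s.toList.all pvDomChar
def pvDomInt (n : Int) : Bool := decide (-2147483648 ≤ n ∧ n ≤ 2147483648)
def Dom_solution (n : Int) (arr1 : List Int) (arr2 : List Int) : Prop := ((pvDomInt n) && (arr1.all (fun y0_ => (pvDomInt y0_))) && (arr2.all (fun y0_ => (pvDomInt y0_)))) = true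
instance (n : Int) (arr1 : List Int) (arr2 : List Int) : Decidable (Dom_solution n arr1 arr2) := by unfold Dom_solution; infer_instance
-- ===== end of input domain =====

-- B builds, per row, the set of marked column positions (union over the two zfill-padded
-- binary strings) and draws the row from that set, instead of comparing the two padded
-- strings character by character; same cost, a different decomposition.


-- ===== PORT A =====
def solution (n : Int) (arr1 : List Int) (arr2 : List Int) : List String :=
  (PySem.List.pyRange 0 n 1).foldl (fun answer i =>
    let n1 := PySem.List.pyGetD arr1 i 0           -- arr1[i]; IndexError excluded by Pre_
    let n2 := PySem.List.pyGetD arr2 i 0           -- arr2[i]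
    let new_n1 := PySem.List.slice (PySem.Int.toBinChars0b n1) (some 2) none   -- bin(n1)[2:]
    let new_n2 := PySem.List.slice (PySem.Int.toBinChars0b n2) (some 2) none   -- bin(n2)[2:]
    let len1 := (new_n1.length : Int)
    let len2 := (new_n2.length : Int)
    let new_n1 := if len1 < n then List.replicate (n - len1).toNat '0' ++ new_n1 else new_n1
    let new_n2 := if len2 < n then List.replicate (n - len2).toNat '0' ++ new_n2 else new_n2
    let now_line := (PySem.List.pyRange 0 n 1).foldl (fun now_line j =>
      if PySem.List.pyGetD new_n1 j ' ' = '0' ∧ PySem.List.pyGetD new_n2 j ' ' = '0'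
      then now_line ++ [' '] else now_line ++ ['#']) ([] : List Char)
    answer ++ [String.ofList now_line]) []

-- ===== PORT B =====
-- {j for j, c in enumerate(s[:n]) if c != '0'} — the marked positions of one rendered string
def markedPositions (n : Int) (s : List Char) : List Int :=
  ((PySem.List.enumerate (PySem.List.slice s none (some n)) 0).filter
      (fun jc => jc.2 != '0')).map (fun jc => jc.1)

def solution_alt (n : Int) (arr1 : List Int) (arr2 : List Int) : List String :=
  (PySem.List.pyRange 0 n 1).foldl (fun rows i =>
    let marked := [PySem.Chars.zfill (PySem.List.slice (PySem.Int.toBinChars0b (PySem.List.pyGetD arr1 i 0)) (some 2) none) n,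
                   PySem.Chars.zfill (PySem.List.slice (PySem.Int.toBinChars0b (PySem.List.pyGetD arr2 i 0)) (some 2) none) n].foldl
      (fun marked s => PySem.Set.union marked (PySem.Set.ofList (markedPositions n s)))
      (PySem.Set.empty : PySem.Set Int)
    rows ++ [String.ofList ((PySem.List.pyRange 0 n 1).map
      (fun j => if PySem.Set.contains marked j then '#' else ' '))]) []

-- ===== PRECONDITION & SPEC =====
-- Pre_ excludes exactly the inputs on which A raises IndexError (fewer than n entries in an array).
def Pre_solution (n : Int) (arr1 : List Int) (arr2 : List Int) : Prop :=
  n ≤ (arr1.length : Int) ∧ n ≤ (arr2.length : Int)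
instance (n : Int) (arr1 : List Int) (arr2 : List Int) : Decidable (Pre_solution n arr1 arr2) := by
  unfold Pre_solution; infer_instance

def pvWitness_solution : Int × List Int × List Int := (2, [1, 2], [2, 3])

def Spec_solution (n : Int) (arr1 : List Int) (arr2 : List Int) (out : List String) : Prop := out = solution_alt n arr1 arr2
instance (n : Int) (arr1 : List Int) (arr2 : List Int) (out : List String) : Decidable (Spec_solution n arr1 arr2 out) := by unfold Spec_solution; infer_instance

-- ===== CLAIM =====
def Claim_equal_solution : Prop := ∀ (n : Int) (arr1 : List Int) (arr2 : List Int), Dom_solution n arr1 arr2 → Pre_solution n arr1 arr2 → Spec_solution n arr1 arr2 (solution n arr1 arr2)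

-- ===== LEMMAS AND PROOFS =====

-- every character that Nat.toDigitsCore 2 emits on top of acc is a binary digit
lemma toDigitsCore_chars (f : Nat) : ∀ (m : Nat) (acc : List Char),
    (∀ c ∈ acc, c = '0' ∨ c = '1') → ∀ c ∈ Nat.toDigitsCore 2 f m acc, c = '0' ∨ c = '1' := by
  induction f with
  | zero => intro m acc hacc c hc; exact hacc c hc
  | succ f ih =>
    intro m acc hacc c hc
    rw [Nat.toDigitsCore] at hc
    have hd : Nat.digitChar (m % 2) = '0' ∨ Nat.digitChar (m % 2) = '1' := by
      have : m % 2 = 0 ∨ m % 2 = 1 := by omega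
      rcases this with h | h <;> rw [h] <;> simp [Nat.digitChar]
    by_cases hz : m / 2 = 0
    · rw [if_pos hz] at hc
      rcases List.mem_cons.mp hc with h | h
      · rw [h]; exact hd
      · exact hacc c h
    · rw [if_neg hz] at hc
      exact ih (m / 2) _ (by
        intro c' hc'
        rcases List.mem_cons.mp hc' with h | h
        · rw [h]; exact hd
        · exact hacc c' h) c hc

lemma toDigitsCore_ne_nil (f : Nat) : ∀ (m : Nat) (acc : List Char), acc ≠ [] →
    Nat.toDigitsCore 2 f m acc ≠ [] := by
  induction f with
  | zero => intro m acc hacc; simpa [Nat.toDigitsCore] using hacc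
  | succ f ih =>
    intro m acc hacc
    rw [Nat.toDigitsCore]
    by_cases hz : m / 2 = 0
    · rw [if_pos hz]; exact List.cons_ne_nil _ _
    · rw [if_neg hz]; exact ih (m / 2) _ (List.cons_ne_nil _ _)

-- the digit string of a Nat is nonempty and starts with '0' or '1'
lemma toDigits_shape (m : Nat) : ∃ c rest, Nat.toDigits 2 m = c :: rest ∧ (c = '0' ∨ c = '1') := by
  have hne : Nat.toDigits 2 m ≠ [] := by
    rw [Nat.toDigits, Nat.toDigitsCore]
    by_cases hz : m / 2 = 0
    · rw [if_pos hz]; exact List.cons_ne_nil _ _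
    · rw [if_neg hz]; exact toDigitsCore_ne_nil m (m / 2) _ (List.cons_ne_nil _ _)
  obtain ⟨c, rest, hcr⟩ : ∃ c rest, Nat.toDigits 2 m = c :: rest := by
    cases h : Nat.toDigits 2 m with
    | nil => exact absurd h hne
    | cons c rest => exact ⟨c, rest, rfl⟩
  refine ⟨c, rest, hcr, ?_⟩
  have : c ∈ Nat.toDigits 2 m := by rw [hcr]; exact List.mem_cons_self
  exact toDigitsCore_chars (m + 1) m [] (by simp) c this

-- bin(v)[2:] as a character list, for both signs
lemma slice_bin_nonneg (v : Int) (h : 0 ≤ v) :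
    PySem.List.slice (PySem.Int.toBinChars0b v) (some 2) none = Nat.toDigits 2 v.toNat := by
  rw [PySem.List.slice_from _ (by norm_num)]
  simp only [PySem.Int.toBinChars0b]
  rw [if_neg (by omega : ¬(v < 0))]
  rfl

lemma slice_bin_neg (v : Int) (h : v < 0) :
    PySem.List.slice (PySem.Int.toBinChars0b v) (some 2) none
      = 'b' :: Nat.toDigits 2 v.natAbs := by
  rw [PySem.List.slice_from _ (by norm_num)]
  simp only [PySem.Int.toBinChars0b]
  rw [if_pos h]
  rfl

-- zfill on a string starting with a non-sign character is plain left zero-padding (A's pad)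
lemma zfill_nonsign_eq_pad (c : Char) (rest : List Char) (w : Int) (hc : ¬(c = '+' ∨ c = '-')) :
    PySem.Chars.zfill (c :: rest) w =
      if ((c :: rest).length : Int) < w
      then List.replicate (w - (c :: rest).length).toNat '0' ++ (c :: rest)
      else c :: rest := by
  unfold PySem.Chars.zfill
  by_cases h : w ≤ ((c :: rest).length : Int)
  · rw [if_pos h, if_neg (by omega)]
  · rw [if_neg h, if_pos (by omega)]
    have : (if c = '+' ∨ c = '-' then c :: (List.replicate (w.toNat - (c :: rest).length) '0' ++ rest)
            else List.replicate (w.toNat - (c :: rest).length) '0' ++ c :: rest)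
        = List.replicate (w.toNat - (c :: rest).length) '0' ++ c :: rest := if_neg hc
    have h2 : (w.toNat - (c :: rest).length) = (w - ((c :: rest).length : Int)).toNat := by omega
    exact this.trans (by rw [h2])

-- B's zfill of bin(v)[2:] is exactly A's conditionally padded string
lemma zfill_bin_eq_pad (v : Int) (w : Int) :
    PySem.Chars.zfill (PySem.List.slice (PySem.Int.toBinChars0b v) (some 2) none) w =
      (if ((PySem.List.slice (PySem.Int.toBinChars0b v) (some 2) none).length : Int) < w
       then List.replicate (w - (PySem.List.slice (PySem.Int.toBinChars0b v) (some 2) none).length).toNat '0'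
              ++ PySem.List.slice (PySem.Int.toBinChars0b v) (some 2) none
       else PySem.List.slice (PySem.Int.toBinChars0b v) (some 2) none) := by
  by_cases hv : 0 ≤ v
  · rw [slice_bin_nonneg v hv]
    obtain ⟨c, rest, hcr, hc01⟩ := toDigits_shape v.toNat
    rw [hcr]
    exact zfill_nonsign_eq_pad c rest w
      (by rcases hc01 with h | h <;> subst h <;> decide)
  · rw [slice_bin_neg v (by omega)]
    exact zfill_nonsign_eq_pad 'b' _ w (by decide)

-- A's conditionally padded string is at least N characters long
lemma length_pad_ge (s : List Char) (N : Nat) :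
    N ≤ (if ((s.length : Int) < ((N : Nat) : Int))
         then List.replicate (((N : Nat) : Int) - s.length).toNat '0' ++ s else s).length := by
  split
  · next h => simp; omega
  · next h => omega

-- membership in one string's marked-position list = that character is not '0'
lemma mem_markedPositions (p : List Char) (N j : Nat) (hj : j < N) (hlen : N ≤ p.length) :
    ((j : Int) ∈ markedPositions ((N : Nat) : Int) p) ↔ p[j]'(by omega) ≠ '0' := by
  unfold markedPositions
  rw [PySem.List.slice_to p (by positivity), Int.toNat_natCast]
  constructor
  · intro hmem
    rw [List.mem_map] at hmem
    obtain ⟨jc, hjc, hfst⟩ := hmem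
    rw [List.mem_filter] at hjc
    obtain ⟨hin, hne⟩ := hjc
    rw [PySem.List.mem_enumerate_iff] at hin
    obtain ⟨k, hk, rfl⟩ := hin
    have hkj : k = j := by
      have := hfst
      simp at this
      omega
    subst hkj
    have hchar : (List.take N p)[k] = p[k]'(by omega) := List.getElem_take
    intro h0
    rw [hchar, h0] at hne
    simp at hne
  · intro hne
    rw [List.mem_map]
    have hjlt : j < (List.take N p).length := by simp; omega
    refine ⟨((0 : Int) + (j : Nat), (List.take N p)[j]), ?_, by simp⟩
    rw [List.mem_filter]
    constructor
    · rw [PySem.List.mem_enumerate_iff]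
      exact ⟨j, hjlt, rfl⟩
    · have : (List.take N p)[j] = p[j]'(by omega) := List.getElem_take
      rw [this]
      simpa using hne

lemma pyRange_nonpos (n : Int) (h : n ≤ 0) : PySem.List.pyRange 0 n 1 = [] := by
  simp [PySem.List.pyRange, show ¬(0:Int) < n by omega]

-- ===== VERDICT (by name: the statement is the Claim_ definition above) =====
theorem solution_spec : Claim_equal_solution := by
  intro n arr1 arr2 _hdom hpre
  unfold Spec_solution
  obtain ⟨h1, h2⟩ := hpre
  by_cases hn : n ≤ 0
  · unfold solution solution_alt
    rw [pyRange_nonpos n hn]; rfl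
  · replace hn : 0 < n := by omega
    obtain ⟨N, hN⟩ : ∃ N : Nat, n = (N : Int) := ⟨n.toNat, by omega⟩
    subst hN
    have hN0 : 0 < N := by exact_mod_cast hn
    have hl1 : N ≤ arr1.length := by exact_mod_cast h1
    have hl2 : N ≤ arr2.length := by exact_mod_cast h2
    unfold solution solution_alt
    rw [PySem.List.pyRange_zero_natCast]
    simp only [PySem.List.foldl_append_singleton_eq_map, List.map_map, List.nil_append]
    apply List.map_congr_left
    intro i hi
    rw [List.mem_range] at hi
    simp only [Function.comp_apply]
    congr 1
    -- both rows are drawn from the same two padded strings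
    set s1 := PySem.List.slice (PySem.Int.toBinChars0b (PySem.List.pyGetD arr1 ((i : Nat) : Int) 0)) (some 2) none with hs1
    set s2 := PySem.List.slice (PySem.Int.toBinChars0b (PySem.List.pyGetD arr2 ((i : Nat) : Int) 0)) (some 2) none with hs2
    set p1 := (if ((s1.length : Int) < ((N : Nat) : Int))
               then List.replicate (((N : Nat) : Int) - s1.length).toNat '0' ++ s1 else s1) with hp1
    set p2 := (if ((s2.length : Int) < ((N : Nat) : Int))
               then List.replicate (((N : Nat) : Int) - s2.length).toNat '0' ++ s2 else s2) with hp2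
    have hlp1 : N ≤ p1.length := by rw [hp1]; exact length_pad_ge s1 N
    have hlp2 : N ≤ p2.length := by rw [hp2]; exact length_pad_ge s2 N
    rw [zfill_bin_eq_pad, zfill_bin_eq_pad, ← hs1, ← hs2, ← hp1, ← hp2]
    -- A's inner loop as a map
    have hbody : (fun (now_line : List Char) (j : Int) =>
        if PySem.List.pyGetD p1 j ' ' = '0' ∧ PySem.List.pyGetD p2 j ' ' = '0'
        then now_line ++ [' '] else now_line ++ ['#'])
        = fun now_line j => now_line ++
            [if PySem.List.pyGetD p1 j ' ' = '0' ∧ PySem.List.pyGetD p2 j ' ' = '0'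
             then ' ' else '#'] := by
      funext line j; split <;> rfl
    rw [hbody]
    simp only [PySem.List.foldl_append_singleton_eq_map, List.map_map, List.nil_append,
      List.foldl_cons, List.foldl_nil]
    apply List.map_congr_left
    intro j hj
    rw [List.mem_range] at hj
    simp only [Function.comp_apply]
    -- A's characters at position j
    rw [PySem.List.pyGetD_natCast p1, PySem.List.pyGetD_natCast p2,
        List.getD_eq_getElem _ _ (by omega : j < p1.length),
        List.getD_eq_getElem _ _ (by omega : j < p2.length)]
    -- B's membership test at position j
    have hcontains : PySem.Set.contains
        (PySem.Set.union (PySem.Set.union PySem.Set.empty (PySem.Set.ofList (markedPositions ((N : Nat) : Int) p1)))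
          (PySem.Set.ofList (markedPositions ((N : Nat) : Int) p2))) ((j : Nat) : Int) = true
        ↔ (p1[j]'(by omega) ≠ '0' ∨ p2[j]'(by omega) ≠ '0') := by
      rw [show (PySem.Set.contains
          (PySem.Set.union (PySem.Set.union PySem.Set.empty (PySem.Set.ofList (markedPositions ((N : Nat) : Int) p1)))
            (PySem.Set.ofList (markedPositions ((N : Nat) : Int) p2))) ((j : Nat) : Int) = true)
          ↔ ((j : Int) ∈ (PySem.Set.union (PySem.Set.union PySem.Set.empty (PySem.Set.ofList (markedPositions ((N : Nat) : Int) p1)))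
            (PySem.Set.ofList (markedPositions ((N : Nat) : Int) p2)))) from List.contains_iff_mem]
      rw [PySem.Set.mem_union, PySem.Set.mem_union, PySem.Set.mem_ofList, PySem.Set.mem_ofList,
          mem_markedPositions p1 N j hj hlp1, mem_markedPositions p2 N j hj hlp2]
      simp [PySem.Set.empty]
    by_cases hc : PySem.Set.contains
        (PySem.Set.union (PySem.Set.union PySem.Set.empty (PySem.Set.ofList (markedPositions ((N : Nat) : Int) p1)))
          (PySem.Set.ofList (markedPositions ((N : Nat) : Int) p2))) ((j : Nat) : Int) = true
    · rw [if_pos hc]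
      have hor := hcontains.mp hc
      apply if_neg
      intro hand
      exact hor.elim (fun h => h hand.1) (fun h => h hand.2)
    · rw [if_neg hc]
      have hnot : ¬(p1[j]'(by omega) ≠ '0' ∨ p2[j]'(by omega) ≠ '0') :=
        fun h => hc (hcontains.mpr h)
      push Not at hnot
      exact if_pos hnot
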